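-- pv_equiv track=rewrite | github.com/EduPav/IA2 | TP1/Exercise_2/Distances_calculator.py | coord
-- ===== SOURCE A (Python) =====
-- def coord(prod_num, maze):
--     """Returns coordinates of a specified product in the maze
--     Args:
--         prod_num (int): Product number to search for
--         maze (List of lists): Maze with zeros for possible paths and ints!=0 representing products.
--
--     Returns:
--         tuple: Coordinates of a prod_num product
--     """
--
--     long_list = []
--     for elem in maze:
--         for value in elem:
--             long_list.append(value)
--     c_coord = long_list.index(prod_num) % 13
--     r_coord = int(long_list.index(prod_num)/13)  #Truncates int value
--     return r_coord, c_coord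
-- ===== SOURCE B (Python) =====
-- def coord(prod_num, maze):
--     """Single-pass scan with a running flat index; returns on first match
--     instead of flattening the whole maze and calling .index twice."""
--     i = 0
--     for row in maze:
--         for value in row:
--             if value == prod_num:
--                 return i // 13, i % 13
--             i += 1
--     raise ValueError(f"{prod_num} is not in list")
-- ===== Notes on version B (the rewrite author's own statement) =====
-- stated objective: simpler
-- what changed: B replaces A's flatten-into-a-new-list plus two .index() scans and float-truncation division with one early-exit pass over the maze keeping a running flat counter, returning (i // 13, i % 13) at the first match.
import Mathlib
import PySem

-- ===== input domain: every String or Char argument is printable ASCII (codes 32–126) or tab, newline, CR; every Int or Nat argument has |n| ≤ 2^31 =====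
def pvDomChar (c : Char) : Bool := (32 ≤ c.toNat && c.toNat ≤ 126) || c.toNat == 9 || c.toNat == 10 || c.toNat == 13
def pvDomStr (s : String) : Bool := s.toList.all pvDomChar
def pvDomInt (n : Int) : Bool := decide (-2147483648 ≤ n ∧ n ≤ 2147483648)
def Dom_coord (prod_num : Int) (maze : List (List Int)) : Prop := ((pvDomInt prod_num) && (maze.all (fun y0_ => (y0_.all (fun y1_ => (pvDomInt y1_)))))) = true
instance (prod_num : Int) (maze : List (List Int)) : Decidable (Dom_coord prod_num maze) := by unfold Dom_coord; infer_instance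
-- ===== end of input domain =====

-- B replaces A's flatten + double .index() + float-truncation division with one
-- early-exit pass keeping a running flat counter (objective: simpler).


-- ===== PORT A =====
def coord (prod_num : Int) (maze : List (List Int)) : Int × Int :=
  -- long_list = []; for elem in maze: for value in elem: long_list.append(value)
  let long_list : List Int :=
    maze.foldl (fun acc elem => elem.foldl (fun a value => a ++ [value]) acc) []
  match PySem.List.index? long_list prod_num with
  | some i =>
      -- c_coord = long_list.index(prod_num) % 13 ; r_coord = int(index/13) (truncating)
      let c_coord := PySem.Int.mod (i : Int) 13
      let r_coord := PySem.Int.truncdiv (i : Int) 13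
      (r_coord, c_coord)
  | none => (0, 0)   -- .index raises ValueError: excluded by Pre_coord

-- ===== PORT B =====
-- inner loop: scan one row, counter c is the running flat index
def rowScanB (prod_num : Int) (c : Int) : List Int → Option (Int × Int)
  | [] => none
  | value :: rest =>
      if value = prod_num then some (PySem.Int.floordiv c 13, PySem.Int.mod c 13)
      else rowScanB prod_num (c + 1) rest

-- outer loop over the rows
def mazeScanB (prod_num : Int) (c : Int) : List (List Int) → Option (Int × Int)
  | [] => none
  | row :: rows =>
      match rowScanB prod_num c row with
      | some out => some out
      | none => mazeScanB prod_num (c + row.length) rows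

def coord_alt (prod_num : Int) (maze : List (List Int)) : Int × Int :=
  match mazeScanB prod_num 0 maze with
  | some out => out
  | none => (0, 0)   -- raise ValueError: excluded by Pre_coord

-- ===== PRECONDITION & SPEC =====
-- Pre_: prod_num occurs somewhere in the maze; otherwise A's .index (and B) raise ValueError.
def Pre_coord (prod_num : Int) (maze : List (List Int)) : Prop :=
  prod_num ∈ maze.flatten
instance (prod_num : Int) (maze : List (List Int)) : Decidable (Pre_coord prod_num maze) := by unfold Pre_coord; infer_instance

def pvWitness_coord : Int × List (List Int) := (5, [[0, 0, 0], [0, 5, 0]])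

def Spec_coord (prod_num : Int) (maze : List (List Int)) (out : Int × Int) : Prop := out = coord_alt prod_num maze
instance (prod_num : Int) (maze : List (List Int)) (out : Int × Int) : Decidable (Spec_coord prod_num maze out) := by unfold Spec_coord; infer_instance

-- ===== CLAIM (what is proved, stated in full; the proofs are below) =====
def Claim_equal_coord : Prop := ∀ (prod_num : Int) (maze : List (List Int)), Dom_coord prod_num maze → Pre_coord prod_num maze → Spec_coord prod_num maze (coord prod_num maze)

-- ===== LEMMAS AND PROOFS =====

-- A's append loop builds exactly the flattened maze
lemma longList_eq_flatten (maze : List (List Int)) (acc : List Int) :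
    maze.foldl (fun acc elem => elem.foldl (fun a value => a ++ [value]) acc) acc
      = acc ++ maze.flatten := by
  induction maze generalizing acc with
  | nil => simp
  | cons row rows ih =>
      rw [List.foldl_cons, PySem.List.foldl_append_singleton, ih]
      simp

lemma index?_append_of_not_mem (t : List Int) (row : List Int) (p : Int) (h : p ∉ row) :
    PySem.List.index? (row ++ t) p = (PySem.List.index? t p).map (· + row.length) := by
  induction row with
  | nil => simp
  | cons x xs ih =>
      simp only [List.mem_cons, not_or] at h
      rw [List.cons_append, PySem.List.index?_cons_of_ne _ (fun e => h.1 e.symm), ih h.2]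
      simp [Option.map_map]

-- B's inner scan, characterised by .index on the row
lemma rowScanB_eq (p : Int) (row : List Int) (c : Int) :
    rowScanB p c row
      = (PySem.List.index? row p).map
          (fun (k : Nat) => (PySem.Int.floordiv (c + (k : Int)) 13, PySem.Int.mod (c + (k : Int)) 13)) := by
  induction row generalizing c with
  | nil => simp [rowScanB, PySem.List.index?]
  | cons v vs ih =>
      by_cases hv : v = p
      · subst hv
        rw [rowScanB, if_pos rfl, PySem.List.index?_cons_self, Option.map_some]
        simp
      · rw [rowScanB, if_neg hv, PySem.List.index?_cons_of_ne _ hv, ih, Option.map_map]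
        congr 1
        funext k
        simp only [Function.comp_apply]
        congr 2 <;> push_cast <;> ring

-- B's outer scan, characterised by .index on the flattened maze
lemma mazeScanB_eq (p : Int) (maze : List (List Int)) (c : Int) :
    mazeScanB p c maze
      = (PySem.List.index? maze.flatten p).map
          (fun (k : Nat) => (PySem.Int.floordiv (c + (k : Int)) 13, PySem.Int.mod (c + (k : Int)) 13)) := by
  induction maze generalizing c with
  | nil => simp [mazeScanB, PySem.List.index?]
  | cons row rows ih =>
      rw [mazeScanB, rowScanB_eq]
      by_cases hm : p ∈ row
      · rw [List.flatten_cons, PySem.List.index?_append_of_mem _ hm]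
        rcases (PySem.List.index?_isSome_iff row p).mpr hm |> Option.isSome_iff_exists.mp with ⟨k, hk⟩
        rw [hk, Option.map_some]
      · rw [(PySem.List.index?_eq_none_iff row p).mpr hm, List.flatten_cons,
            index?_append_of_not_mem _ _ _ hm, ih, Option.map_map]
        cases PySem.List.index? rows.flatten p with
        | none => rfl
        | some k =>
            simp only [Option.map_none, Option.map_some, Function.comp_apply]
            congr 3 <;> push_cast <;> ring

lemma truncdiv_eq_floordiv_of_natCast (i : Nat) :
    PySem.Int.truncdiv (i : Int) 13 = PySem.Int.floordiv (i : Int) 13 := by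
  simp [PySem.Int.truncdiv, PySem.Int.floordiv, Int.fdiv_eq_ediv]

-- ===== VERDICT (by name: the statement is the Claim_ definition above) =====
theorem coord_spec : Claim_equal_coord := by
  intro p maze _ hpre
  unfold Spec_coord coord coord_alt
  rw [mazeScanB_eq]
  simp only [longList_eq_flatten, List.nil_append]
  rcases Option.isSome_iff_exists.mp ((PySem.List.index?_isSome_iff maze.flatten p).mpr hpre)
    with ⟨k, hk⟩
  rw [hk, Option.map_some]
  simp [truncdiv_eq_floordiv_of_natCast]
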